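-- pv_equiv track=rewrite | github.com/nordeim/Context7-Agent | Grok4/orig-improved.src/themes.py | get_theme_styles
-- ===== SOURCE A (Python) =====
-- def get_theme_styles(theme: str) -> dict:
--     """
--     Returns a dictionary of Rich styles for a given theme.
--     Includes all necessary keys for the immersive UI.
--     """
--     if theme == "cyberpunk":
--         return {
--             "panel": "bold magenta on black",
--             "response": "cyan on black",
--             "preview": "green on black",
--             "header": "bold yellow on black",
--             "footer": "dim white on black",
--             "loader": "blink magenta",
--             "chat_user": "bold blue",
--             "chat_agent": "bold green",
--             "result": "italic cyan",
--             "error": "bold white on red",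
--             "particle": "Searching MCP [magenta]•[/][cyan]•[/][blue]•[/]"
--         }
--     elif theme == "ocean":
--         return {
--             "panel": "bold blue on cyan",
--             "response": "white on blue",
--             "preview": "green on cyan",
--             "header": "bold white on blue",
--             "footer": "dim black on cyan",
--             "loader": "blink blue",
--             "chat_user": "bold yellow",
--             "chat_agent": "bold white",
--             "result": "italic white",
--             "error": "bold white on red",
--             "particle": "Diving deep [blue]~[/][cyan]~[/][white]~[/]"
--         }
--     elif theme == "forest":
--         return {
--             "panel": "bold green on default",
--             "response": "yellow on default",
--             "preview": "bright_green on default",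
--             "header": "bold white on green",
--             "footer": "dim white on green",
--             "loader": "blink green",
--             "chat_user": "bold yellow",
--             "chat_agent": "bold green",
--             "result": "italic white",
--             "error": "bold white on red",
--             "particle": "Exploring the woods [green]•[/][yellow]•[/]"
--         }
--     elif theme == "sunset":
--         return {
--             "panel": "bold yellow on red",
--             "response": "white on dark_orange",
--             "preview": "cyan on dark_orange",
--             "header": "bold white on red",
--             "footer": "dim white on red",
--             "loader": "blink yellow",
--             "chat_user": "bold cyan",
--             "chat_agent": "bold yellow",
--             "result": "italic white",
--             "error": "bold white on red",
--             "particle": "Chasing the horizon [yellow]•[/][red]•[/]"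
--         }
--     # Provide a robust default to prevent key errors if a theme is misconfigured.
--     return get_theme_styles("cyberpunk")
-- ===== SOURCE B (Python) =====
-- # Column-oriented style matrix: per-key rows of per-theme values; the dict is
-- # assembled key by key from the theme's column (cyberpunk column is the fallback).
--
-- _COLUMN = {"cyberpunk": 0, "ocean": 1, "forest": 2, "sunset": 3}
--
-- _MATRIX = [
--     ("panel", ("bold magenta on black", "bold blue on cyan",
--                "bold green on default", "bold yellow on red")),
--     ("response", ("cyan on black", "white on blue",
--                   "yellow on default", "white on dark_orange")),
--     ("preview", ("green on black", "green on cyan",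
--                  "bright_green on default", "cyan on dark_orange")),
--     ("header", ("bold yellow on black", "bold white on blue",
--                 "bold white on green", "bold white on red")),
--     ("footer", ("dim white on black", "dim black on cyan",
--                 "dim white on green", "dim white on red")),
--     ("loader", ("blink magenta", "blink blue", "blink green", "blink yellow")),
--     ("chat_user", ("bold blue", "bold yellow", "bold yellow", "bold cyan")),
--     ("chat_agent", ("bold green", "bold white", "bold green", "bold yellow")),
--     ("result", ("italic cyan", "italic white", "italic white", "italic white")),
--     ("error", ("bold white on red",) * 4),
--     ("particle", ("Searching MCP [magenta]\u2022[/][cyan]\u2022[/][blue]\u2022[/]",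
--                   "Diving deep [blue]~[/][cyan]~[/][white]~[/]",
--                   "Exploring the woods [green]\u2022[/][yellow]\u2022[/]",
--                   "Chasing the horizon [yellow]\u2022[/][red]\u2022[/]")),
-- ]
--
--
-- def get_theme_styles(theme: str) -> dict:
--     """Assemble the Rich style dict key by key from the theme's column of the matrix."""
--     col = _COLUMN.get(theme, 0)
--     return {key: row[col] for key, row in _MATRIX}
-- ===== Notes on version B (the rewrite author's own statement) =====
-- stated objective: alternative
-- what changed: Replaced the if-elif chain returning whole row dicts (with a recursive call for the default) by a column-oriented matrix: each style key stores a 4-tuple of per-theme values, a theme-to-column index (0 fallback) is looked up once, and the dict is assembled key by key from that column.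
import Mathlib
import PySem

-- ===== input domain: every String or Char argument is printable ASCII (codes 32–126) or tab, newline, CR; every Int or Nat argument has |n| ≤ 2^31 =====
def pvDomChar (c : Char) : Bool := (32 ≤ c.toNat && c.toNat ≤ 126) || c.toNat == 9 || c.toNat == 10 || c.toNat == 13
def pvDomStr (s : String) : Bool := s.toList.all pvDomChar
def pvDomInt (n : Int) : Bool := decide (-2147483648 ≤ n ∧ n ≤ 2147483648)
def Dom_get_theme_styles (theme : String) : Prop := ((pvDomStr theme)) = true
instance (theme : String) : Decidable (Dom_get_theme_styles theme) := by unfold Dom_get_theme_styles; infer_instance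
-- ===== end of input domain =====

-- B replaces A's if-elif chain over whole per-theme dicts by a column-oriented matrix:
-- per style key a 4-tuple of per-theme values, assembled key by key from the theme's column.

-- ===== PORT A =====
def get_theme_styles (theme : String) : List (String × String) :=
  if theme == "cyberpunk" then
    [("panel", "bold magenta on black"), ("response", "cyan on black"),
     ("preview", "green on black"), ("header", "bold yellow on black"),
     ("footer", "dim white on black"), ("loader", "blink magenta"),
     ("chat_user", "bold blue"), ("chat_agent", "bold green"),
     ("result", "italic cyan"), ("error", "bold white on red"),
     ("particle", "Searching MCP [magenta]•[/][cyan]•[/][blue]•[/]")]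
  else if theme == "ocean" then
    [("panel", "bold blue on cyan"), ("response", "white on blue"),
     ("preview", "green on cyan"), ("header", "bold white on blue"),
     ("footer", "dim black on cyan"), ("loader", "blink blue"),
     ("chat_user", "bold yellow"), ("chat_agent", "bold white"),
     ("result", "italic white"), ("error", "bold white on red"),
     ("particle", "Diving deep [blue]~[/][cyan]~[/][white]~[/]")]
  else if theme == "forest" then
    [("panel", "bold green on default"), ("response", "yellow on default"),
     ("preview", "bright_green on default"), ("header", "bold white on green"),
     ("footer", "dim white on green"), ("loader", "blink green"),
     ("chat_user", "bold yellow"), ("chat_agent", "bold green"),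
     ("result", "italic white"), ("error", "bold white on red"),
     ("particle", "Exploring the woods [green]•[/][yellow]•[/]")]
  else if theme == "sunset" then
    [("panel", "bold yellow on red"), ("response", "white on dark_orange"),
     ("preview", "cyan on dark_orange"), ("header", "bold white on red"),
     ("footer", "dim white on red"), ("loader", "blink yellow"),
     ("chat_user", "bold cyan"), ("chat_agent", "bold yellow"),
     ("result", "italic white"), ("error", "bold white on red"),
     ("particle", "Chasing the horizon [yellow]•[/][red]•[/]")]
  else
    get_theme_styles "cyberpunk"
termination_by (if theme == "cyberpunk" then 0 else 1)
decreasing_by simp_all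

-- ===== PORT B =====
-- _COLUMN: theme name → column index
def pvCOLUMN : PySem.Dict String Nat :=
  PySem.Dict.ofList [("cyberpunk", 0), ("ocean", 1), ("forest", 2), ("sunset", 3)]

-- _MATRIX: per style key, the 4-tuple (cyberpunk, ocean, forest, sunset) of values
def pvMATRIX : List (String × (String × String × String × String)) :=
  [("panel", ("bold magenta on black", "bold blue on cyan",
              "bold green on default", "bold yellow on red")),
   ("response", ("cyan on black", "white on blue",
                 "yellow on default", "white on dark_orange")),
   ("preview", ("green on black", "green on cyan",
                "bright_green on default", "cyan on dark_orange")),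
   ("header", ("bold yellow on black", "bold white on blue",
               "bold white on green", "bold white on red")),
   ("footer", ("dim white on black", "dim black on cyan",
               "dim white on green", "dim white on red")),
   ("loader", ("blink magenta", "blink blue", "blink green", "blink yellow")),
   ("chat_user", ("bold blue", "bold yellow", "bold yellow", "bold cyan")),
   ("chat_agent", ("bold green", "bold white", "bold green", "bold yellow")),
   ("result", ("italic cyan", "italic white", "italic white", "italic white")),
   ("error", ("bold white on red", "bold white on red",
              "bold white on red", "bold white on red")),
   ("particle", ("Searching MCP [magenta]•[/][cyan]•[/][blue]•[/]",
                 "Diving deep [blue]~[/][cyan]~[/][white]~[/]",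
                 "Exploring the woods [green]•[/][yellow]•[/]",
                 "Chasing the horizon [yellow]•[/][red]•[/]"))]

-- row[col]: selecting the col-th component of a 4-tuple (Python tuple indexing, col ∈ {0,1,2,3})
def pvPick (row : String × String × String × String) (col : Nat) : String :=
  match col with
  | 0 => row.1
  | 1 => row.2.1
  | 2 => row.2.2.1
  | _ => row.2.2.2

def get_theme_styles_alt (theme : String) : List (String × String) :=
  let col := PySem.Dict.getD pvCOLUMN theme 0
  pvMATRIX.map (fun kr => (kr.1, pvPick kr.2 col))

-- ===== PRECONDITION & SPEC =====
def Spec_get_theme_styles (theme : String) (out : List (String × String)) : Prop := out = get_theme_styles_alt theme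
instance (theme : String) (out : List (String × String)) : Decidable (Spec_get_theme_styles theme out) := by unfold Spec_get_theme_styles; infer_instance

-- ===== CLAIM (what is proved, stated in full; the proofs are below) =====
def Claim_equal_get_theme_styles : Prop := ∀ (theme : String), Dom_get_theme_styles theme → Spec_get_theme_styles theme (get_theme_styles theme)

-- ===== LEMMAS AND PROOFS =====

-- ===== VERDICT (by name: the statement is the Claim_ definition above) =====
theorem get_theme_styles_spec : Claim_equal_get_theme_styles := by
  intro theme _
  unfold Spec_get_theme_styles get_theme_styles get_theme_styles_alt
  by_cases h1 : theme = "cyberpunk"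
  · subst h1; decide
  · by_cases h2 : theme = "ocean"
    · subst h2; decide
    · by_cases h3 : theme = "forest"
      · subst h3; decide
      · by_cases h4 : theme = "sunset"
        · subst h4; decide
        · simp only [beq_iff_eq, h1, h2, h3, h4, if_false]
          rw [get_theme_styles]
          have hc : pvCOLUMN.contains theme = false := by
            rw [PySem.Dict.contains_eq_decide_mem_keys]
            have hk : pvCOLUMN.keys = ["cyberpunk", "ocean", "forest", "sunset"] := by decide
            rw [hk]; simp [h1, h2, h3, h4]
          rw [PySem.Dict.getD_of_not_contains pvCOLUMN _ hc]
          decide
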